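-- pv_equiv track=rewrite | github.com/IvanParvanovski/SoftUniPractice | Python/Softuniada_Practice/ol_2019/ex10.py | generate_field
-- ===== SOURCE A (Python) =====
-- def generate_field(channels_values, field_length):
--     current_field = list()
--
--     for channel in channels_values:
--         roots = channel[0]
--         fungus = channel[1]
--
--         current_field.append(['T'] * roots +
--                              ['-'] * (field_length - (fungus + roots)) +
--                              ['F'] * fungus)
--
--     return current_field
-- ===== SOURCE B (Python) =====
-- def generate_field(channels_values, field_length):
--     rows = []
--     for roots, fungus in channels_values:
--         lr = max(0, roots)
--         lf = max(0, fungus)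
--         lg = max(0, field_length - (fungus + roots))
--         row = []
--         for i in range(lr + lg + lf):
--             if i < lr:
--                 row.append('T')
--             elif i < lr + lg:
--                 row.append('-')
--             else:
--                 row.append('F')
--         rows.append(row)
--     return rows
-- ===== Notes on version B (the rewrite author's own statement) =====
-- stated objective: alternative
-- what changed: Each row cell is produced positionally by comparing the index against clamped segment boundaries in a single range loop, instead of concatenating three multiplied lists.
import Mathlib
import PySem

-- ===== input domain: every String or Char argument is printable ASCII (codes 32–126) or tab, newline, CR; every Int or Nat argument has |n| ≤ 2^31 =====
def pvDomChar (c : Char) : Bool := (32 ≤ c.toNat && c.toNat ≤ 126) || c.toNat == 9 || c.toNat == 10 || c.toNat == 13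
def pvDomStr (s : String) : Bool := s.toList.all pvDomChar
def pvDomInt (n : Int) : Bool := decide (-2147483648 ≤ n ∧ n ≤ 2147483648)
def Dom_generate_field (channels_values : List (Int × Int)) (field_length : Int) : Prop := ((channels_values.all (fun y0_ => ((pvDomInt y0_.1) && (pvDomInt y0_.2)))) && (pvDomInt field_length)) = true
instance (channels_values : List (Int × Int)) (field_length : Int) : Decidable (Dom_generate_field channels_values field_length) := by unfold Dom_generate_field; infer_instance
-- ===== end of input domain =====

-- B builds each row cell-by-cell from index/boundary comparisons instead of concatenating three multiplied runs (alternative decomposition, same cost).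

-- ===== PORT A =====
-- Python list multiplication ['T'] * roots clamps a negative count to the empty list: Int.toNat is exactly that clamp.
def generate_field (channels_values : List (Int × Int)) (field_length : Int) : List (List String) :=
  channels_values.foldl (fun current_field channel =>
    let roots := channel.1
    let fungus := channel.2
    current_field ++ [List.replicate roots.toNat "T" ++
                      List.replicate (field_length - (fungus + roots)).toNat "-" ++
                      List.replicate fungus.toNat "F"]) []

-- ===== PORT B =====
def generate_field_alt (channels_values : List (Int × Int)) (field_length : Int) : List (List String) :=
  channels_values.foldl (fun rows channel =>
    let roots := channel.1
    let fungus := channel.2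
    let lr := max 0 roots
    let lf := max 0 fungus
    let lg := max 0 (field_length - (fungus + roots))
    let row := (PySem.List.pyRange 0 (lr + lg + lf) 1).foldl (fun row i =>
      row ++ [if i < lr then "T" else if i < lr + lg then "-" else "F"]) []
    rows ++ [row]) []

-- ===== PRECONDITION & SPEC =====
def Spec_generate_field (channels_values : List (Int × Int)) (field_length : Int) (out : List (List String)) : Prop := out = generate_field_alt channels_values field_length
instance (channels_values : List (Int × Int)) (field_length : Int) (out : List (List String)) : Decidable (Spec_generate_field channels_values field_length out) := by unfold Spec_generate_field; infer_instance

-- ===== CLAIM (what is proved, stated in full; the proofs are below) =====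
def Claim_equal_generate_field : Prop := ∀ (channels_values : List (Int × Int)) (field_length : Int), Dom_generate_field channels_values field_length → Spec_generate_field channels_values field_length (generate_field channels_values field_length)

-- ===== LEMMAS AND PROOFS =====

-- an append-singleton foldl is a map
theorem foldl_app_map {α β : Type} (l : List α) (f : α → β) (acc : List β) :
    l.foldl (fun r i => r ++ [f i]) acc = acc ++ l.map f := by
  induction l generalizing acc with
  | nil => simp
  | cons x xs ih => simp [List.foldl_cons, ih]

-- the positional cell function over a full range equals the three replicate runs
theorem seg_eq (a g c : Nat) :
    (List.range (a + g + c)).map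
      (fun (k : Nat) => if (k : Int) < (a : Int) then "T"
                else if (k : Int) < (a : Int) + (g : Int) then "-" else "F")
    = List.replicate a "T" ++ (List.replicate g "-" ++ List.replicate c "F") := by
  apply List.ext_getElem
  · simp; omega
  · intro k h1 h2
    simp only [List.getElem_map, List.getElem_range, List.getElem_append,
      List.getElem_replicate, List.length_replicate] at *
    split_ifs
    all_goals try rfl
    all_goals (exfalso; push_cast at *; omega)

theorem row_eq (field_length roots fungus : Int) :
    (PySem.List.pyRange 0 (max 0 roots + max 0 (field_length - (fungus + roots)) + max 0 fungus) 1).map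
      (fun i => if i < max 0 roots then "T"
                else if i < max 0 roots + max 0 (field_length - (fungus + roots)) then "-" else "F")
    = List.replicate roots.toNat "T" ++
      (List.replicate (field_length - (fungus + roots)).toNat "-" ++
       List.replicate fungus.toNat "F") := by
  have hmax : ∀ n : Int, max 0 n = (n.toNat : Int) := by
    intro n; rw [Int.ofNat_toNat, max_comm]
  rw [hmax, hmax, hmax, PySem.List.pyRange_one]
  have hn : (((roots.toNat : Int) + (field_length - (fungus + roots)).toNat + fungus.toNat) - 0).toNat
      = roots.toNat + (field_length - (fungus + roots)).toNat + fungus.toNat := by omega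
  rw [hn, List.map_map]
  refine Eq.trans ?_ (seg_eq roots.toNat (field_length - (fungus + roots)).toNat fungus.toNat)
  apply List.map_congr_left
  intro k _
  simp

-- ===== VERDICT (by name: the statement is the Claim_ definition above) =====
theorem generate_field_spec : Claim_equal_generate_field := by
  intro cv fl _
  unfold Spec_generate_field generate_field generate_field_alt
  rw [foldl_app_map, foldl_app_map]
  simp only [List.nil_append]
  apply List.map_congr_left
  intro ch _
  rw [foldl_app_map, List.nil_append, row_eq, List.append_assoc]
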